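-- pv_equiv track=rewrite | github.com/Hyeri-hci/ODOCAIagent | backend/agents/diagnosis/tools/onboarding_tasks.py | determine_difficulty_from_labels
-- ===== SOURCE A (Python) =====
-- from typing import Any, Dict, List, Literal, Optional
--
-- Difficulty = Literal["beginner", "intermediate", "advanced"]
--
-- BEGINNER_LABELS = {
--     "good first issue",
--     "good-first-issue",
--     "beginner",
--     "beginner-friendly",
--     "first-timers-only",
--     "first-time-contributor",
--     "easy",
--     "starter",
--     "newbie",
--     "hacktoberfest",
-- }
--
-- INTERMEDIATE_LABELS = {
--     "help wanted",
--     "help-wanted",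
--     "documentation",
--     "docs",
--     "tests",
--     "testing",
--     "enhancement",
--     "feature",
--     "improvement",
-- }
--
-- ADVANCED_LABELS = {
--     "bug",
--     "critical",
--     "security",
--     "performance",
--     "refactor",
--     "breaking-change",
--     "architecture",
--     "core",
-- }
--
-- def determine_difficulty_from_labels(labels: List[str]) -> Difficulty:
--     """라벨 목록에서 난이도 결정."""
--     labels_lower = {label.lower() for label in labels}
--
--     # Beginner 라벨 우선
--     if labels_lower & BEGINNER_LABELS:
--         return "beginner"
--
--     # Advanced 라벨
--     if labels_lower & ADVANCED_LABELS:
--         return "advanced"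
--
--     # Intermediate 라벨 또는 기본값
--     if labels_lower & INTERMEDIATE_LABELS:
--         return "intermediate"
--
--     return "intermediate"  # 기본값
-- ===== SOURCE B (Python) =====
-- LABEL_PRIORITY = {
--     "good first issue": 0,
--     "good-first-issue": 0,
--     "beginner": 0,
--     "beginner-friendly": 0,
--     "first-timers-only": 0,
--     "first-time-contributor": 0,
--     "easy": 0,
--     "starter": 0,
--     "newbie": 0,
--     "hacktoberfest": 0,
--     "bug": 1,
--     "critical": 1,
--     "security": 1,
--     "performance": 1,
--     "refactor": 1,
--     "breaking-change": 1,
--     "architecture": 1,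
--     "core": 1,
--     "help wanted": 2,
--     "help-wanted": 2,
--     "documentation": 2,
--     "docs": 2,
--     "tests": 2,
--     "testing": 2,
--     "enhancement": 2,
--     "feature": 2,
--     "improvement": 2,
-- }
--
-- _NAMES = ["beginner", "advanced", "intermediate"]
--
-- def determine_difficulty_from_labels(labels):
--     """라벨 목록에서 난이도 결정."""
--     rank = 2
--     for label in labels:
--         rank = min(rank, LABEL_PRIORITY.get(label.lower(), 2))
--     return _NAMES[rank]
-- ===== Notes on version B (the rewrite author's own statement) =====
-- stated objective: simpler
-- what changed: Replaces the three set-intersection tests over a freshly built lowered-label set with a single accumulating pass that looks each lowered label up in one keyword-to-rank dict and keeps the minimum rank, mapping the final rank back to its name.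
import Mathlib
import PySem

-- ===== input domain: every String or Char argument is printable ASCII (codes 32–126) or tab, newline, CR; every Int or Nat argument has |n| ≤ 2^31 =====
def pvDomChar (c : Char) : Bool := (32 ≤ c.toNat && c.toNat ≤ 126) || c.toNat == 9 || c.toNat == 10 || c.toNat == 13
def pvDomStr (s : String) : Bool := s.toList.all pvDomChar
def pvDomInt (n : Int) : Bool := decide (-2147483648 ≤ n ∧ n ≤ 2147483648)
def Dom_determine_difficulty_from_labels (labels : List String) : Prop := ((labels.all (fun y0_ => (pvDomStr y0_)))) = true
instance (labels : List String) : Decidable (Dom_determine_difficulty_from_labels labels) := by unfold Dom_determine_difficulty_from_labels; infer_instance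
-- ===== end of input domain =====

-- B replaces A's three set-intersection tests by one accumulating min-rank pass over a
-- keyword→rank dict (objective: simpler).

-- ===== PORT A =====
def BEGINNER_LABELS : PySem.Set String := PySem.Set.ofList
  ["good first issue", "good-first-issue", "beginner", "beginner-friendly",
   "first-timers-only", "first-time-contributor", "easy", "starter", "newbie", "hacktoberfest"]

def INTERMEDIATE_LABELS : PySem.Set String := PySem.Set.ofList
  ["help wanted", "help-wanted", "documentation", "docs", "tests", "testing",
   "enhancement", "feature", "improvement"]

def ADVANCED_LABELS : PySem.Set String := PySem.Set.ofList
  ["bug", "critical", "security", "performance", "refactor", "breaking-change",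
   "architecture", "core"]

def determine_difficulty_from_labels (labels : List String) : String :=
  let labels_lower : PySem.Set String := PySem.Set.ofList (labels.map PySem.Str.lower)
  if PySem.Set.inter labels_lower BEGINNER_LABELS ≠ [] then "beginner"
  else if PySem.Set.inter labels_lower ADVANCED_LABELS ≠ [] then "advanced"
  else if PySem.Set.inter labels_lower INTERMEDIATE_LABELS ≠ [] then "intermediate"
  else "intermediate"

-- ===== PORT B =====
def LABEL_PRIORITY : PySem.Dict String Int := PySem.Dict.ofList
  [("good first issue", 0), ("good-first-issue", 0), ("beginner", 0), ("beginner-friendly", 0),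
   ("first-timers-only", 0), ("first-time-contributor", 0), ("easy", 0), ("starter", 0),
   ("newbie", 0), ("hacktoberfest", 0),
   ("bug", 1), ("critical", 1), ("security", 1), ("performance", 1), ("refactor", 1),
   ("breaking-change", 1), ("architecture", 1), ("core", 1),
   ("help wanted", 2), ("help-wanted", 2), ("documentation", 2), ("docs", 2), ("tests", 2),
   ("testing", 2), ("enhancement", 2), ("feature", 2), ("improvement", 2)]

def pvNames : List String := ["beginner", "advanced", "intermediate"]

def determine_difficulty_from_labels_alt (labels : List String) : String :=
  let rank : Int :=
    labels.foldl (fun r label => min r (PySem.Dict.getD LABEL_PRIORITY (PySem.Str.lower label) 2)) 2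
  PySem.List.pyGetD pvNames rank ""

-- ===== PRECONDITION & SPEC =====
def Spec_determine_difficulty_from_labels (labels : List String) (out : String) : Prop := out = determine_difficulty_from_labels_alt labels
instance (labels : List String) (out : String) : Decidable (Spec_determine_difficulty_from_labels labels out) := by unfold Spec_determine_difficulty_from_labels; infer_instance

-- ===== CLAIM (what is proved, stated in full; the proofs are below) =====
def Claim_equal_determine_difficulty_from_labels : Prop := ∀ (labels : List String), Dom_determine_difficulty_from_labels labels → Spec_determine_difficulty_from_labels labels (determine_difficulty_from_labels labels)

-- ===== LEMMAS AND PROOFS =====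

-- B's dict lookup agrees with A's set memberships: rank 0 on beginner keywords,
-- 1 on advanced keywords, 2 otherwise (intermediate keywords map to 2 explicitly).
set_option maxRecDepth 100000 in
set_option maxHeartbeats 2000000 in
theorem rank_char (s : String) :
    PySem.Dict.getD LABEL_PRIORITY s 2 =
      if s ∈ BEGINNER_LABELS then 0 else if s ∈ ADVANCED_LABELS then 1 else 2 := by
  by_cases h : s ∈ (["good first issue", "good-first-issue", "beginner", "beginner-friendly",
     "first-timers-only", "first-time-contributor", "easy", "starter", "newbie", "hacktoberfest",
     "bug", "critical", "security", "performance", "refactor", "breaking-change", "architecture",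
     "core", "help wanted", "help-wanted", "documentation", "docs", "tests", "testing",
     "enhancement", "feature", "improvement"] : List String)
  · fin_cases h <;> decide
  · have hn : PySem.Dict.get? LABEL_PRIORITY s = none := by
      have hkeys : PySem.Dict.keys LABEL_PRIORITY =
        ["good first issue", "good-first-issue", "beginner", "beginner-friendly",
         "first-timers-only", "first-time-contributor", "easy", "starter", "newbie", "hacktoberfest",
         "bug", "critical", "security", "performance", "refactor", "breaking-change", "architecture",
         "core", "help wanted", "help-wanted", "documentation", "docs", "tests", "testing",
         "enhancement", "feature", "improvement"] := by decide
      rw [PySem.Dict.get?_eq_none_iff_not_mem_keys, hkeys]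
      exact h
    rw [PySem.Dict.getD_eq_get?_getD, hn]
    rw [if_neg (fun hs => h (by simp only [BEGINNER_LABELS, PySem.Set.mem_ofList] at hs; simp at hs ⊢; tauto)),
        if_neg (fun hs => h (by simp only [ADVANCED_LABELS, PySem.Set.mem_ofList] at hs; simp at hs ⊢; tauto))]
    rfl

-- A's truthiness test: the intersection with a keyword set is nonempty iff some
-- label lowercases into that set.
theorem inter_ne_nil_iff (labels : List String) (S : List String) :
    PySem.Set.inter (PySem.Set.ofList (labels.map PySem.Str.lower)) S ≠ [] ↔
      ∃ l ∈ labels, PySem.Str.lower l ∈ S := by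
  rw [← List.isEmpty_eq_false_iff, List.isEmpty_eq_false_iff_exists_mem]
  constructor
  · rintro ⟨y, hy⟩
    rw [PySem.Set.mem_inter, PySem.Set.mem_ofList, List.mem_map] at hy
    obtain ⟨⟨l, hl, rfl⟩, hS⟩ := hy
    exact ⟨l, hl, hS⟩
  · rintro ⟨l, hl, hS⟩
    exact ⟨PySem.Str.lower l, by
      rw [PySem.Set.mem_inter, PySem.Set.mem_ofList, List.mem_map]
      exact ⟨⟨l, hl, rfl⟩, hS⟩⟩

-- Characterisation of B's accumulating pass (generalising the accumulator).
theorem fold_char (labels : List String) (a : Int) (h : a ≤ 2) :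
    labels.foldl (fun r label => min r (PySem.Dict.getD LABEL_PRIORITY (PySem.Str.lower label) 2)) a =
      min a (if ∃ l ∈ labels, PySem.Str.lower l ∈ BEGINNER_LABELS then 0
             else if ∃ l ∈ labels, PySem.Str.lower l ∈ ADVANCED_LABELS then 1 else 2) := by
  induction labels generalizing a with
  | nil => simpa using h
  | cons x xs ih =>
    rw [List.foldl_cons, ih (min a (PySem.Dict.getD LABEL_PRIORITY (PySem.Str.lower x) 2))
      (le_trans (min_le_left _ _) h), rank_char]
    by_cases hb : PySem.Str.lower x ∈ BEGINNER_LABELS <;>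
      by_cases ha : PySem.Str.lower x ∈ ADVANCED_LABELS <;>
      by_cases tb : ∃ l ∈ xs, PySem.Str.lower l ∈ BEGINNER_LABELS <;>
      by_cases ta : ∃ l ∈ xs, PySem.Str.lower l ∈ ADVANCED_LABELS <;>
      simp [hb, ha, tb, ta, List.mem_cons, exists_eq_or_imp]

-- ===== VERDICT (by name: the statement is the Claim_ definition above) =====
theorem determine_difficulty_from_labels_spec : Claim_equal_determine_difficulty_from_labels := by
  intro labels _
  unfold Spec_determine_difficulty_from_labels determine_difficulty_from_labels
    determine_difficulty_from_labels_alt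
  simp only [fold_char labels 2 (by omega), inter_ne_nil_iff]
  by_cases hb : ∃ l ∈ labels, PySem.Str.lower l ∈ BEGINNER_LABELS <;>
    by_cases ha : ∃ l ∈ labels, PySem.Str.lower l ∈ ADVANCED_LABELS <;>
    simp [hb, ha] <;> decide
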